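-- pv_equiv track=rewrite | github.com/Billnguyenh/portal-config-parser | win_parser/winreport.py | groupMatchingHosts
-- ===== SOURCE A (Python) =====
-- def groupMatchingHosts(matchingHosts:dict) -> dict:
--     hostGroups = dict()
--     groupCounter = 1
--
--     for host1, host2 in matchingHosts.items():
--
--         key = findKeyForHostInNestedHostDict(host1, hostGroups)
--         if (key == ""):
--             key = "group" + str(groupCounter)
--             hostGroups[key] = {host1, host2}
--             groupCounter += 1
--         elif (key != ""):
--             hostGroups[key].add(host2)
--
--         key = findKeyForHostInNestedHostDict(host2, hostGroups)
--         if (key == ""):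
--             key = "group" + str(groupCounter)
--             hostGroups[key] = {host2, host1}
--         elif (key != ""):
--             hostGroups[key].add(host1)
--     return hostGroups #Returns a dictionary with Set values
--
-- def findKeyForHostInNestedHostDict(host:str, hostGroups:dict) -> str:
--     key = ""
--     if (hostGroups == {}):
--         return key
--     else:
--         for group in hostGroups:
--             if host in hostGroups[group]:
--                 key = group
--     return key
-- ===== SOURCE B (Python) =====
-- def groupMatchingHosts(matchingHosts: dict) -> dict:
--     groups = []  # group k holds the set for name "group" + str(k + 1)
--     last = {}    # host -> highest index of a group containing it (O(1) lookup)
--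
--     def touch(host, i):
--         j = last.get(host)
--         if j is None or j < i:
--             last[host] = i
--
--     for h1, h2 in matchingHosts.items():
--         i = last.get(h1)
--         if i is None:
--             i = len(groups)
--             groups.append({h1, h2})
--             last[h1] = i
--             touch(h2, i)
--         else:
--             groups[i].add(h2)
--             touch(h2, i)
--         j = last[h2]
--         groups[j].add(h1)
--         touch(h1, j)
--     return {"group" + str(k + 1): s for k, s in enumerate(groups)}
-- ===== Notes on version B (the rewrite author's own statement) =====
-- stated objective: faster
-- what changed: A rescans every group's set on each lookup (findKeyForHostInNestedHostDict iterates over all groups twice per pair); B maintains a host-to-last-group-index dictionary plus a list of group sets, so each pair is handled with O(1) dictionary lookups and the inner scan disappears.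
import Mathlib
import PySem

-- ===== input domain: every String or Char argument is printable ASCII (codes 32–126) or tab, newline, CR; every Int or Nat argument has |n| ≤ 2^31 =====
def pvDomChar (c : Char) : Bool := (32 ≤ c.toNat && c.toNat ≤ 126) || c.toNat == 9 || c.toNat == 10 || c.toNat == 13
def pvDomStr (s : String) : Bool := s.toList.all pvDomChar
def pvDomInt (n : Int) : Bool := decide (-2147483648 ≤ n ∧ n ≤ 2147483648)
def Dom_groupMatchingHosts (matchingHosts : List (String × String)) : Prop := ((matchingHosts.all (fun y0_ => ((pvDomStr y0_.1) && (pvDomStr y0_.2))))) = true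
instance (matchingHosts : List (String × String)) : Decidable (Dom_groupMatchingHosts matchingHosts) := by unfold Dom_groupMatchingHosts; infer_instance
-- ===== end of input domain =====

-- B replaces A's O(n·groups) rescan of every group per pair by a host→last-group-index
-- dictionary, making each step O(1) dictionary work (objective: faster, asymptotic).

-- ===== PORT A =====
-- for group in hostGroups: if host in hostGroups[group]: key = group   (last match wins);
-- the lookup hostGroups[group] is ported as getD with an empty-set default, exact because
-- group is always one of hostGroups' own keys.
def findKeyForHostInNestedHostDict (host : String)
    (hostGroups : PySem.Dict String (PySem.Set String)) : String :=
  if hostGroups.items = [] then ""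
  else
    hostGroups.keys.foldl
      (fun key group =>
        if PySem.Set.contains (hostGroups.getD group PySem.Set.empty) host then group else key)
      ""

-- the body of A's "for host1, host2 in matchingHosts.items()" loop
def pvStepA (st : PySem.Dict String (PySem.Set String) × Int) (p : String × String) :
    PySem.Dict String (PySem.Set String) × Int :=
  let hostGroups := st.1
  let groupCounter := st.2
  let host1 := p.1
  let host2 := p.2
  let key := findKeyForHostInNestedHostDict host1 hostGroups
  let st1 :=
    if key = "" then
      (hostGroups.insert ("group" ++ PySem.Int.toStr groupCounter)
        (PySem.Set.ofList [host1, host2]), groupCounter + 1)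
    else
      (hostGroups.modify key PySem.Set.empty (fun s => PySem.Set.add s host2), groupCounter)
  let hostGroups1 := st1.1
  let groupCounter1 := st1.2
  let key2 := findKeyForHostInNestedHostDict host2 hostGroups1
  let hostGroups2 :=
    if key2 = "" then
      hostGroups1.insert ("group" ++ PySem.Int.toStr groupCounter1)
        (PySem.Set.ofList [host2, host1])
    else
      hostGroups1.modify key2 PySem.Set.empty (fun s => PySem.Set.add s host1)
  (hostGroups2, groupCounter1)

def groupMatchingHosts (matchingHosts : List (String × String)) : List (String × List String) :=
  (((PySem.Dict.ofList matchingHosts).items.foldl pvStepA (PySem.Dict.empty, 1)).1).items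

-- ===== PORT B =====
-- def touch(host, i): j = last.get(host); if j is None or j < i: last[host] = i
def pvBump (last : PySem.Dict String Nat) (host : String) (i : Nat) : PySem.Dict String Nat :=
  match last.get? host with
  | none => last.insert host i
  | some j => if j < i then last.insert host i else last

-- the body of B's loop: groups is the list of sets (index k ↔ name "group"+str(k+1)),
-- last maps a host to the highest index of a group containing it
def pvStepB (st : List (PySem.Set String) × PySem.Dict String Nat) (p : String × String) :
    List (PySem.Set String) × PySem.Dict String Nat :=
  let h1 := p.1
  let h2 := p.2
  let st1 :=
    match st.2.get? h1 with
    | none =>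
        let i := st.1.length
        (st.1 ++ [PySem.Set.ofList [h1, h2]], pvBump (st.2.insert h1 i) h2 i)
    | some i =>
        (st.1.set i (PySem.Set.add (st.1.getD i PySem.Set.empty) h2), pvBump st.2 h2 i)
  let j := st1.2.getD h2 0
  (st1.1.set j (PySem.Set.add (st1.1.getD j PySem.Set.empty) h1), pvBump st1.2 h1 j)

def groupMatchingHosts_alt (matchingHosts : List (String × String)) : List (String × List String) :=
  let groups := ((PySem.Dict.ofList matchingHosts).items.foldl pvStepB ([], PySem.Dict.empty)).1
  (PySem.List.enumerate groups).map (fun p => ("group" ++ PySem.Int.toStr (p.1 + 1), p.2))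

-- ===== PRECONDITION & SPEC =====
def Spec_groupMatchingHosts (matchingHosts : List (String × String)) (out : List (String × List String)) : Prop := out = groupMatchingHosts_alt matchingHosts
instance (matchingHosts : List (String × String)) (out : List (String × List String)) : Decidable (Spec_groupMatchingHosts matchingHosts out) := by unfold Spec_groupMatchingHosts; infer_instance

-- ===== CLAIM (what is proved, stated in full; the proofs are below) =====
def Claim_equal_groupMatchingHosts : Prop := ∀ (matchingHosts : List (String × String)), Dom_groupMatchingHosts matchingHosts → Spec_groupMatchingHosts matchingHosts (groupMatchingHosts matchingHosts)

-- ===== LEMMAS AND PROOFS =====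

-- the name of group number i (groups are created with counter values 1, 2, …)
def pvName (i : Nat) : String := "group" ++ PySem.Int.toStr ((i : Int) + 1)

def pvO2S : Option Nat → String
  | none => ""
  | some i => pvName i

-- index of the LAST group (in list order) whose set contains h
def pvLastIdx? (h : String) : List (PySem.Set String) → Option Nat
  | [] => none
  | s :: gs =>
    match pvLastIdx? h gs with
    | some i => some (i + 1)
    | none => if h ∈ s then some 0 else none

-- the coupling invariant between A's state (dict + counter) and B's state (group list + last map)
def pvInv (dA : PySem.Dict String (PySem.Set String)) (c : Int)
    (groups : List (PySem.Set String)) (last : PySem.Dict String Nat) : Prop :=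
  dA.keys = (List.range groups.length).map pvName ∧
  (∀ i : Nat, dA.get? (pvName i) = groups[i]?) ∧
  c = (groups.length : Int) + 1 ∧
  (∀ h : String, last.get? h = pvLastIdx? h groups)

-- ---- str(n) is injective on positive numbers ----
def pvRep (n : Nat) : List Char :=
  if n = 0 then ['0'] else ((Nat.digits 10 n).map Nat.digitChar).reverse

lemma pv_toDigitsCore_eq : ∀ (fuel n : Nat) (ds : List Char), 0 < fuel → n < 10 ^ fuel →
    Nat.toDigitsCore 10 fuel n ds = pvRep n ++ ds := by
  intro fuel
  induction fuel with
  | zero => intro n ds h; omega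
  | succ fuel ih =>
    intro n ds _ hn
    by_cases h10 : n / 10 = 0
    · have hlt : n < 10 := by omega
      rw [Nat.toDigitsCore]
      simp only [h10]
      by_cases h0 : n = 0
      · subst h0; simp [pvRep]; decide
      · have hdig : Nat.digits 10 n = [n] := by
          rw [Nat.digits_def' (by norm_num) (Nat.pos_of_ne_zero h0), h10]
          simp [Nat.mod_eq_of_lt hlt]
        simp only [pvRep, if_neg h0, hdig, List.map_cons, List.map_nil, List.reverse_cons,
          List.reverse_nil, List.nil_append, Nat.mod_eq_of_lt hlt]
        simp
    · have hfuel : 0 < fuel := by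
        by_contra hf
        have : fuel = 0 := by omega
        subst this
        simp at hn
        omega
      have hdiv : n / 10 < 10 ^ fuel := by
        rw [Nat.div_lt_iff_lt_mul (by norm_num)]
        calc n < 10 ^ (fuel + 1) := hn
        _ = 10 ^ fuel * 10 := by ring
      rw [Nat.toDigitsCore]
      simp only [h10]
      rw [ih (n / 10) ((n % 10).digitChar :: ds) hfuel hdiv]
      have hn0 : n ≠ 0 := by omega
      have hd : Nat.digits 10 n = n % 10 :: Nat.digits 10 (n / 10) :=
        Nat.digits_def' (by norm_num) (Nat.pos_of_ne_zero hn0)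
      simp [pvRep, hn0, h10, hd]

lemma pv_toDigits_eq (n : Nat) : Nat.toDigits 10 n = pvRep n := by
  have h1 : n < 10 ^ (n + 1) := by
    calc n < 10 ^ n := Nat.lt_pow_self (by norm_num)
    _ ≤ 10 ^ (n + 1) := Nat.pow_le_pow_right (by norm_num) (by omega)
  have := pv_toDigitsCore_eq (n + 1) n [] (by omega) h1
  simpa [Nat.toDigits] using this

lemma pv_map_digitChar_inj : ∀ (l1 l2 : List Nat), (∀ x ∈ l1, x < 10) → (∀ x ∈ l2, x < 10) →
    l1.map Nat.digitChar = l2.map Nat.digitChar → l1 = l2 := by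
  have hd : ∀ d < 10, ∀ e < 10, Nat.digitChar d = Nat.digitChar e → d = e := by decide
  intro l1
  induction l1 with
  | nil => intro l2 _ _ h; cases l2 <;> simp_all
  | cons a l1 ih =>
    intro l2 h1 h2 h
    cases l2 with
    | nil => simp at h
    | cons b l2 =>
      simp only [List.map_cons, List.cons.injEq] at h
      have hab := hd a (h1 a (by simp)) b (h2 b (by simp)) h.1
      rw [hab, ih l2 (fun x hx => h1 x (by simp [hx])) (fun x hx => h2 x (by simp [hx])) h.2]

lemma pvRep_inj {m n : Nat} (hm : 0 < m) (hn : 0 < n) (h : pvRep m = pvRep n) : m = n := by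
  unfold pvRep at h
  rw [if_neg (by omega), if_neg (by omega)] at h
  rw [List.reverse_inj] at h
  have hdig := pv_map_digitChar_inj (Nat.digits 10 m) (Nat.digits 10 n)
    (fun x hx => Nat.digits_lt_base (by norm_num) hx)
    (fun x hx => Nat.digits_lt_base (by norm_num) hx) h
  have := congrArg (Nat.ofDigits 10) hdig
  simpa [Nat.ofDigits_digits] using this

lemma pv_toStr_pos (m : Nat) :
    (PySem.Int.toStr ((m : Int) + 1)).toList = Nat.toDigits 10 (m + 1) := by
  rw [PySem.Int.toList_toStr]
  unfold PySem.Int.toChars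
  rw [if_neg (by omega)]
  congr 1

lemma pvName_inj : Function.Injective pvName := by
  intro m n h
  unfold pvName at h
  have h2 := congrArg String.toList h
  rw [String.toList_append, String.toList_append] at h2
  have h3 := List.append_cancel_left h2
  rw [pv_toStr_pos, pv_toStr_pos, pv_toDigits_eq, pv_toDigits_eq] at h3
  have := pvRep_inj (Nat.succ_pos m) (Nat.succ_pos n) h3
  omega

lemma pvName_ne_empty (i : Nat) : pvName i ≠ "" := by
  intro h
  have h2 := congrArg String.toList h
  rw [pvName, String.toList_append] at h2
  simp at h2

-- ---- pvLastIdx? facts ----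
lemma pvLastIdx?_lt {h : String} : ∀ {gs : List (PySem.Set String)} {i : Nat},
    pvLastIdx? h gs = some i → i < gs.length := by
  intro gs
  induction gs with
  | nil => intro i hi; simp [pvLastIdx?] at hi
  | cons s gs ih =>
    intro i hi
    simp only [pvLastIdx?] at hi
    cases hgs : pvLastIdx? h gs with
    | some k =>
      rw [hgs] at hi; have := ih hgs; simp at hi
      simp only [List.length_cons]; omega
    | none =>
      rw [hgs] at hi
      by_cases hm : h ∈ s
      · simp [hm] at hi; simp [← hi]
      · simp [hm] at hi

lemma pvLastIdx?_append (h : String) (gs : List (PySem.Set String)) (s : PySem.Set String) :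
    pvLastIdx? h (gs ++ [s]) = if h ∈ s then some gs.length else pvLastIdx? h gs := by
  induction gs with
  | nil => simp [pvLastIdx?]
  | cons g gs ih =>
    simp only [List.cons_append, pvLastIdx?, ih]
    by_cases hm : h ∈ s <;> simp [hm]

lemma pvLastIdx?_set_ne {h x : String} (hne : h ≠ x) :
    ∀ (gs : List (PySem.Set String)) (j : Nat), j < gs.length →
    pvLastIdx? h (gs.set j (PySem.Set.add (gs.getD j PySem.Set.empty) x)) = pvLastIdx? h gs := by
  intro gs
  induction gs with
  | nil => intro j hj; simp at hj
  | cons g gs ih =>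
    intro j hj
    cases j with
    | zero =>
      simp only [List.set_cons_zero, List.getD_cons_zero, pvLastIdx?]
      have hmem : h ∈ PySem.Set.add g x ↔ h ∈ g := by
        rw [PySem.Set.mem_add]; simp [hne]
      simp [hmem]
    | succ j =>
      simp only [List.set_cons_succ, List.getD_cons_succ, pvLastIdx?]
      rw [ih j (by simpa using hj)]

lemma pvLastIdx?_set_self (x : String) :
    ∀ (gs : List (PySem.Set String)) (j : Nat), j < gs.length →
    pvLastIdx? x (gs.set j (PySem.Set.add (gs.getD j PySem.Set.empty) x)) =
      some (match pvLastIdx? x gs with | some i => max i j | none => j) := by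
  intro gs
  induction gs with
  | nil => intro j hj; simp at hj
  | cons g gs ih =>
    intro j hj
    cases j with
    | zero =>
      simp only [List.set_cons_zero, List.getD_cons_zero, pvLastIdx?]
      have hx : x ∈ PySem.Set.add g x := by rw [PySem.Set.mem_add]; simp
      cases hgs : pvLastIdx? x gs with
      | some i => simp
      | none => by_cases hg : x ∈ g <;> simp [hg]
    | succ j =>
      simp only [List.set_cons_succ, List.getD_cons_succ, pvLastIdx?]
      rw [ih j (by simpa using hj)]
      cases hgs : pvLastIdx? x gs <;> by_cases hg : x ∈ g <;>
        simp [hg, Nat.succ_max_succ]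

-- ---- findKey computes pvLastIdx? ----
lemma pv_fold_range (h : String) : ∀ (groups : List (PySem.Set String)),
    (List.range groups.length).foldl
      (fun key i => if h ∈ (groups[i]?.getD PySem.Set.empty) then pvName i else key) ""
    = pvO2S (pvLastIdx? h groups) := by
  intro groups
  induction groups using List.reverseRecOn with
  | nil => simp [pvLastIdx?, pvO2S]
  | append_singleton gs s ih =>
    have hlen : (gs ++ [s]).length = gs.length + 1 := by simp
    rw [hlen, List.range_succ, List.foldl_append]
    have hcongr := PySem.List.foldl_congr_mem (List.range gs.length)
      (fun key i => if h ∈ ((gs ++ [s])[i]?.getD PySem.Set.empty) then pvName i else key)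
      (fun key i => if h ∈ (gs[i]?.getD PySem.Set.empty) then pvName i else key) ""
      (by
        intro acc i hi
        have hi' : i < gs.length := List.mem_range.mp hi
        simp only [List.getElem?_append_left hi'])
    rw [hcongr, ih]
    simp only [List.foldl_cons, List.foldl_nil, List.getElem?_concat_length, Option.getD_some]
    rw [pvLastIdx?_append]
    by_cases hm : h ∈ s <;> simp [hm, pvO2S]

lemma pv_findKey_eq (dA : PySem.Dict String (PySem.Set String))
    (groups : List (PySem.Set String))
    (hK : dA.keys = (List.range groups.length).map pvName)
    (hG : ∀ i : Nat, dA.get? (pvName i) = groups[i]?) (h : String) :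
    findKeyForHostInNestedHostDict h dA = pvO2S (pvLastIdx? h groups) := by
  unfold findKeyForHostInNestedHostDict
  by_cases hnil : dA.items = []
  · have hkeys : dA.keys = [] := by simp [PySem.Dict.keys, hnil]
    have hlen : groups.length = 0 := by
      rw [hkeys] at hK
      have := congrArg List.length hK
      simpa using this.symm
    have hg : groups = [] := List.length_eq_zero_iff.mp hlen
    subst hg
    simp [hnil, pvLastIdx?, pvO2S]
  · rw [if_neg hnil, hK, List.foldl_map]
    rw [PySem.List.foldl_congr_mem _ _
      (fun key i => if h ∈ (groups[i]?.getD PySem.Set.empty) then pvName i else key) _ ?_]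
    · exact pv_fold_range h groups
    · intro acc i hi
      have hgd : dA.getD (pvName i) PySem.Set.empty = groups[i]?.getD PySem.Set.empty := by
        show (dA.get? (pvName i)).getD PySem.Set.empty = _
        rw [hG]
      rw [hgd]
      simp

-- ---- the two sub-operations preserve the invariant ----
lemma pv_add_inv {dA c groups last} (hInv : pvInv dA c groups last)
    {j : Nat} (hj : j < groups.length) (x : String) :
    pvInv (dA.modify (pvName j) PySem.Set.empty (fun s => PySem.Set.add s x)) c
      (groups.set j (PySem.Set.add (groups.getD j PySem.Set.empty) x))
      (pvBump last x j) := by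
  obtain ⟨hK, hG, hC, hL⟩ := hInv
  have hjget : dA.get? (pvName j) = some groups[j] := by
    rw [hG, List.getElem?_eq_getElem hj]
  have hcont : dA.contains (pvName j) = true := by
    cases hcb : dA.contains (pvName j) with
    | false =>
      have h0 := (PySem.Dict.get?_eq_none_iff_contains dA (pvName j)).mpr hcb
      rw [hjget] at h0
      simp at h0
    | true => rfl
  have hgetD : dA.getD (pvName j) PySem.Set.empty = groups.getD j PySem.Set.empty := by
    show (dA.get? (pvName j)).getD PySem.Set.empty = _
    rw [hjget, List.getD_eq_getElem?_getD, List.getElem?_eq_getElem hj]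
  refine ⟨?_, ?_, ?_, ?_⟩
  · rw [PySem.Dict.keys_modify, PySem.Dict.keys_insert_of_contains _ _ hcont, hK,
      List.length_set]
  · intro t
    show (dA.insert (pvName j) _).get? (pvName t) = _
    by_cases ht : t = j
    · subst ht
      rw [PySem.Dict.get?_insert_self, hgetD, List.getElem?_set_self hj]
    · rw [PySem.Dict.get?_insert_of_ne _ _ (fun hnn => ht (pvName_inj hnn)), hG,
        List.getElem?_set_ne (fun hh => ht hh.symm)]
  · rw [List.length_set]; exact hC
  · intro h
    by_cases hhx : h = x
    · subst hhx
      rw [pvLastIdx?_set_self h groups j hj]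
      unfold pvBump
      rw [hL]
      cases hli : pvLastIdx? h groups with
      | none => simp [PySem.Dict.get?_insert_self]
      | some i =>
        by_cases hij : i < j
        · simp [hij, PySem.Dict.get?_insert_self, Nat.max_eq_right (le_of_lt hij)]
        · have hmax : max i j = i := Nat.max_eq_left (by omega)
          simp [hij, hmax, hL, hli]
    · rw [pvLastIdx?_set_ne hhx groups j hj]
      unfold pvBump
      cases hlx : last.get? x with
      | none =>
        dsimp only
        rw [PySem.Dict.get?_insert_of_ne _ _ hhx, hL]
      | some i =>
        dsimp only
        by_cases hij : i < j
        · rw [if_pos hij, PySem.Dict.get?_insert_of_ne _ _ hhx, hL]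
        · rw [if_neg hij]
          exact hL h

lemma pv_new_inv {dA c groups last} (hInv : pvInv dA c groups last) (h1 h2 : String)
    (hnone : pvLastIdx? h1 groups = none) :
    pvInv (dA.insert (pvName groups.length) (PySem.Set.ofList [h1, h2])) (c + 1)
      (groups ++ [PySem.Set.ofList [h1, h2]])
      (pvBump (last.insert h1 groups.length) h2 groups.length) := by
  obtain ⟨hK, hG, hC, hL⟩ := hInv
  have hfresh : dA.contains (pvName groups.length) = false := by
    rw [← PySem.Dict.get?_eq_none_iff_contains, hG]
    exact List.getElem?_eq_none (le_refl _)
  refine ⟨?_, ?_, ?_, ?_⟩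
  · rw [PySem.Dict.keys_insert_of_not_contains _ _ hfresh, hK]
    simp [List.range_succ]
  · intro t
    by_cases ht : t = groups.length
    · subst ht
      rw [PySem.Dict.get?_insert_self, List.getElem?_concat_length]
    · rw [PySem.Dict.get?_insert_of_ne _ _ (fun hnn => ht (pvName_inj hnn)), hG]
      by_cases hlt : t < groups.length
      · rw [List.getElem?_append_left hlt]
      · rw [List.getElem?_eq_none (by omega), List.getElem?_eq_none (by simp; omega)]
  · have hlen2 : (groups ++ [PySem.Set.ofList [h1, h2]]).length = groups.length + 1 := by simp
    rw [hlen2, hC]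
    push_cast
    ring
  · intro h
    rw [pvLastIdx?_append]
    by_cases hh2 : h = h2
    · subst hh2
      have hm : h ∈ PySem.Set.ofList [h1, h] := by
        rw [PySem.Set.mem_ofList]; simp
      rw [if_pos hm]
      unfold pvBump
      by_cases hh12 : h = h1
      · subst hh12
        rw [PySem.Dict.get?_insert_self]
        simp [PySem.Dict.get?_insert_self]
      · rw [PySem.Dict.get?_insert_of_ne _ _ hh12, hL]
        cases hli : pvLastIdx? h groups with
        | none => simp [PySem.Dict.get?_insert_self]
        | some j0 =>
          have := pvLastIdx?_lt hli
          simp [this, PySem.Dict.get?_insert_self]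
    · have hbump : ∀ d : PySem.Dict String Nat,
          (pvBump d h2 groups.length).get? h = d.get? h := by
        intro d
        unfold pvBump
        cases d.get? h2 with
        | none =>
          dsimp only
          rw [PySem.Dict.get?_insert_of_ne _ _ hh2]
        | some j0 =>
          dsimp only
          by_cases hij : j0 < groups.length
          · rw [if_pos hij, PySem.Dict.get?_insert_of_ne _ _ hh2]
          · rw [if_neg hij]
      rw [hbump]
      by_cases hh1 : h = h1
      · subst hh1
        rw [PySem.Dict.get?_insert_self,
          if_pos (by rw [PySem.Set.mem_ofList]; simp)]
      · rw [PySem.Dict.get?_insert_of_ne _ _ hh1, hL,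
          if_neg (by rw [PySem.Set.mem_ofList]; simp [hh1, hh2])]

lemma pv_step_inv {dA c groups last} (hInv : pvInv dA c groups last) (p : String × String) :
    pvInv (pvStepA (dA, c) p).1 (pvStepA (dA, c) p).2
      (pvStepB (groups, last) p).1 (pvStepB (groups, last) p).2 := by
  obtain ⟨hK, hG, hC, hL⟩ := hInv
  have hfk1 := pv_findKey_eq dA groups hK hG p.1
  simp only [pvStepA, pvStepB]
  simp only [hfk1, hL p.1]
  cases hli : pvLastIdx? p.1 groups with
  | none =>
    have hcname : "group" ++ PySem.Int.toStr c = pvName groups.length := by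
      rw [hC]; rfl
    simp only [pvO2S, if_true, hcname]
    have hInv' := pv_new_inv ⟨hK, hG, hC, hL⟩ p.1 p.2 hli
    obtain ⟨hK', hG', hC', hL'⟩ := hInv'
    have hfk2 := pv_findKey_eq _ _ hK' hG' p.2
    have hli2 : pvLastIdx? p.2 (groups ++ [PySem.Set.ofList [p.1, p.2]])
        = some groups.length := by
      rw [pvLastIdx?_append, if_pos (by rw [PySem.Set.mem_ofList]; simp)]
    have hj2 : (pvBump (last.insert p.1 groups.length) p.2 groups.length).getD p.2 0
        = groups.length := by
      show ((pvBump (last.insert p.1 groups.length) p.2 groups.length).get? p.2).getD 0 = _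
      rw [hL' p.2, hli2]
      rfl
    simp only [hfk2, hli2, pvO2S, if_neg (pvName_ne_empty groups.length), hj2]
    exact pv_add_inv ⟨hK', hG', hC', hL'⟩ (j := groups.length) (by simp) p.1
  | some i =>
    simp only [pvO2S, if_neg (pvName_ne_empty i)]
    have hi : i < groups.length := pvLastIdx?_lt hli
    have hInv' := pv_add_inv ⟨hK, hG, hC, hL⟩ hi p.2
    obtain ⟨hK', hG', hC', hL'⟩ := hInv'
    have hfk2 := pv_findKey_eq _ _ hK' hG' p.2
    have hli2 := pvLastIdx?_set_self p.2 groups i hi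
    have hj2 : (pvBump last p.2 i).getD p.2 0
        = (match pvLastIdx? p.2 groups with | some i0 => max i0 i | none => i) := by
      show ((pvBump last p.2 i).get? p.2).getD 0 = _
      rw [hL' p.2, hli2]
      rfl
    simp only [hfk2, hli2, pvO2S,
      if_neg (pvName_ne_empty (match pvLastIdx? p.2 groups with | some i0 => max i0 i | none => i)),
      hj2]
    have hlt2 : (match pvLastIdx? p.2 groups with | some i0 => max i0 i | none => i)
        < (groups.set i (PySem.Set.add (groups.getD i PySem.Set.empty) p.2)).length :=
      pvLastIdx?_lt hli2
    exact pv_add_inv ⟨hK', hG', hC', hL'⟩ hlt2 p.1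

lemma pv_fold_inv : ∀ (ps : List (String × String)) {dA c groups last},
    pvInv dA c groups last →
    pvInv (ps.foldl pvStepA (dA, c)).1 (ps.foldl pvStepA (dA, c)).2
      (ps.foldl pvStepB (groups, last)).1 (ps.foldl pvStepB (groups, last)).2 := by
  intro ps
  induction ps with
  | nil => intro dA c groups last h; exact h
  | cons p ps ih =>
    intro dA c groups last h
    simp only [List.foldl_cons]
    exact ih (pv_step_inv h p)

lemma pv_final {dA c groups last} (hInv : pvInv dA c groups last) :
    dA.items =
      (PySem.List.enumerate groups).map (fun p => ("group" ++ PySem.Int.toStr (p.1 + 1), p.2)) := by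
  obtain ⟨hK, hG, hC, hL⟩ := hInv
  have hnd : dA.keys.Nodup := by
    rw [hK]
    exact List.nodup_range.map pvName_inj
  rw [PySem.Dict.items_eq_map_keys dA hnd PySem.Set.empty, hK]
  apply List.ext_getElem
  · simp [PySem.List.length_enumerate]
  · intro t ht1 ht2
    have hlt : t < groups.length := by simpa using ht1
    simp only [List.getElem_map, List.getElem_range]
    rw [PySem.List.getElem_enumerate groups 0 t
      (by rw [PySem.List.length_enumerate]; exact hlt)]
    have c1 : pvName t = "group" ++ PySem.Int.toStr (0 + (t : Int) + 1) := by
      unfold pvName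
      norm_num
    have c2 : dA.getD (pvName t) PySem.Set.empty = groups[t] := by
      show (dA.get? (pvName t)).getD PySem.Set.empty = _
      rw [hG, List.getElem?_eq_getElem hlt]
      rfl
    rw [c2, c1]

-- ===== VERDICT (by name: the statement is the Claim_ definition above) =====
theorem groupMatchingHosts_spec : Claim_equal_groupMatchingHosts := by
  intro mh _hdom
  unfold Spec_groupMatchingHosts groupMatchingHosts groupMatchingHosts_alt
  have h0 : pvInv PySem.Dict.empty 1 [] PySem.Dict.empty := by
    refine ⟨rfl, ?_, rfl, ?_⟩
    · intro i; simp [PySem.Dict.get?_empty]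
    · intro h; simp [PySem.Dict.get?_empty, pvLastIdx?]
  exact pv_final (pv_fold_inv ((PySem.Dict.ofList mh).items) h0)
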